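-- pv_equiv track=rewrite | github.com/justin-tak0426/programmers | A171_탁준혁_20250129.py | solution
-- ===== SOURCE A (Python) =====
-- def solution(a, b, n):
--     answer = 0
--
--     while n >= a:
--         bot = (n//a) * b
--
--         answer += bot
--         bot = (n//a) * b
--         rem = n%a
--         n = bot + rem
--
--     return answer
-- ===== SOURCE B (Python) =====
-- def solution(a, b, n):
--     n0 = n
--     while n >= a:
--         n = (n // a) * b + n % a
--     if n == n0:
--         return 0
--     return b * (n0 - n) // (a - b)
-- ===== Notes on version B (the rewrite author's own statement) =====
-- stated objective: alternative
-- what changed: B drops the in-loop accumulator, iterates only the bottle count n, and derives the answer after the loop from the conservation identity answer = b*(n0 - n_final)/(a - b).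
-- outside the precondition, e.g. on solution(-2, -5, -2): A returns -5, B returns -5
import Mathlib
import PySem

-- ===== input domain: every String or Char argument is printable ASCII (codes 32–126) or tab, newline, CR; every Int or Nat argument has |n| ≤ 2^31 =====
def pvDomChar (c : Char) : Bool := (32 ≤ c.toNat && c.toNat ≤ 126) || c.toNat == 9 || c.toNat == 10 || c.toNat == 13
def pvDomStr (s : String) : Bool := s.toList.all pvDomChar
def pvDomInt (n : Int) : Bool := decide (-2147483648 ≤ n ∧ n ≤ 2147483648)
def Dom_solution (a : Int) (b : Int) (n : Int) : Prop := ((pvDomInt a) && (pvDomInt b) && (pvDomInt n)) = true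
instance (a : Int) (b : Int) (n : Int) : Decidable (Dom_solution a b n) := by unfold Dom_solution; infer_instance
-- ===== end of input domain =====

-- B: same exchange loop on n alone (no accumulator); answer recovered afterwards from the
-- conservation identity answer = b*(n0 - n_final)/(a - b). Same number of iterations as A.

-- termination measure lemma for both loops (guard: 1 ≤ a ∧ b < a ∧ a ≤ n makes the recursion total;
-- inside Pre_ the guard coincides with Python's `n >= a`)
theorem pvStep_toNat_lt (a b n : Int) (h1 : 1 ≤ a) (h2 : b < a) (h3 : a ≤ n) :
    (PySem.Int.floordiv n a * b + PySem.Int.mod n a).toNat < n.toNat := by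
  have hid := PySem.Int.floordiv_mul_add_mod n a
  have hq : 1 ≤ PySem.Int.floordiv n a := by
    rw [PySem.Int.le_floordiv_iff_mul_le (by omega)]; omega
  have hstep : PySem.Int.floordiv n a * b + PySem.Int.mod n a
      = n - PySem.Int.floordiv n a * (a - b) := by ring_nf; nlinarith [hid]
  have : a - b ≤ PySem.Int.floordiv n a * (a - b) :=
    le_mul_of_one_le_left (by omega) hq
  omega

-- ===== PORT A =====
def solLoopA (a b n answer : Int) : Int :=
  if h : 1 ≤ a ∧ b < a ∧ a ≤ n then
    -- bot = (n//a)*b; answer += bot; bot = (n//a)*b; rem = n%a; n = bot + rem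
    let bot := PySem.Int.floordiv n a * b
    let answer := answer + bot
    let bot := PySem.Int.floordiv n a * b
    let rem := PySem.Int.mod n a
    solLoopA a b (bot + rem) answer
  else answer
termination_by n.toNat
decreasing_by exact pvStep_toNat_lt a b n h.1 h.2.1 h.2.2

def solution (a : Int) (b : Int) (n : Int) : Int := solLoopA a b n 0

-- ===== PORT B =====
def solLoopB (a b n : Int) : Int :=
  if h : 1 ≤ a ∧ b < a ∧ a ≤ n then
    solLoopB a b (PySem.Int.floordiv n a * b + PySem.Int.mod n a)
  else n
termination_by n.toNat
decreasing_by exact pvStep_toNat_lt a b n h.1 h.2.1 h.2.2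

def solution_alt (a : Int) (b : Int) (n : Int) : Int :=
  let f := solLoopB a b n
  if f = n then 0 else PySem.Int.floordiv (b * (n - f)) (a - b)

-- ===== PRECONDITION & SPEC =====
-- Pre_ excludes the inputs where A's loop diverges (b ≥ a with n ≥ a) or raises ZeroDivisionError
-- (a == 0 with n ≥ 0), and conservatively all a ≤ 0 with n ≥ a, where termination depends
-- intricately on (a, b, n); on the excluded a < 0 inputs where A does terminate B returns the same value.
def Pre_solution (a : Int) (b : Int) (n : Int) : Prop := n < a ∨ (1 ≤ a ∧ b < a)
instance (a : Int) (b : Int) (n : Int) : Decidable (Pre_solution a b n) := by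
  unfold Pre_solution; infer_instance

def pvWitness_solution : Int × Int × Int := (3, 1, 20)

def Spec_solution (a : Int) (b : Int) (n : Int) (out : Int) : Prop := out = solution_alt a b n
instance (a : Int) (b : Int) (n : Int) (out : Int) : Decidable (Spec_solution a b n out) := by
  unfold Spec_solution; infer_instance

-- ===== CLAIM (what is proved, stated in full; the proofs are below) =====
def Claim_equal_solution : Prop := ∀ (a : Int) (b : Int) (n : Int),
  Dom_solution a b n → Pre_solution a b n → Spec_solution a b n (solution a b n)

-- ===== LEMMAS AND PROOFS =====

-- conservation invariant linking the two loops
theorem pvConservation (a b n answer : Int) :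
    (a - b) * (solLoopA a b n answer - answer) = b * (n - solLoopB a b n) := by
  induction n using solLoopB.induct a b generalizing answer with
  | case1 n h ih =>
    rw [solLoopA, dif_pos h, solLoopB, dif_pos h]
    have hid := PySem.Int.floordiv_mul_add_mod n a
    have := ih (answer + PySem.Int.floordiv n a * b)
    set q := PySem.Int.floordiv n a
    set r := PySem.Int.mod n a
    set s := solLoopA a b (q * b + r) (answer + q * b)
    set t := solLoopB a b (q * b + r)
    nlinarith [this]
  | case2 n h =>
    rw [solLoopA, dif_neg h, solLoopB, dif_neg h]; ring

-- ===== VERDICT (by name: the statement is the Claim_ definition above) =====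
theorem solution_spec : Claim_equal_solution := by
  intro a b n _ hpre
  unfold Spec_solution solution solution_alt
  have hcons := pvConservation a b n 0
  rcases hpre with hlt | ⟨h1, h2⟩
  · -- n < a: both loops stop at once
    have hA : solLoopA a b n 0 = 0 := by rw [solLoopA, dif_neg (by omega)]
    have hB : solLoopB a b n = n := by rw [solLoopB, dif_neg (by omega)]
    simp [hA, hB]
  · have hab : a - b ≠ 0 := by omega
    by_cases hf : solLoopB a b n = n
    · rw [hf] at hcons
      rw [if_pos hf]
      have hz : (a - b) * (solLoopA a b n 0 - 0) = 0 := by rw [hcons]; ring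
      rcases mul_eq_zero.mp hz with h | h
      · omega
      · omega
    · rw [if_neg hf]
      have hbn : b * (n - solLoopB a b n) = (a - b) * (solLoopA a b n 0 - 0) := hcons.symm
      have hv : b * (n - solLoopB a b n) = (a - b) * solLoopA a b n 0 := by
        rw [hbn]; ring
      rw [hv, PySem.Int.floordiv_eq_ediv_of_pos (by omega : (0:Int) < a - b),
        Int.mul_ediv_cancel_left _ hab]
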